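-- pv_equiv track=rewrite | github.com/g1tsys/coding | Day 3 - Score 100/398-turntable_sushi.py | find_next_cheaper
-- ===== SOURCE A (Python) =====
-- def find_next_cheaper(prices, i):
--     n = len(prices)
--     # 从当前位置向前和向后搜索最近的更便宜的寿司
--     for d in range(1, n):
--         # 向后查找
--         j = (i + d) % n
--         if prices[j] < prices[i]:
--             return prices[j]
--         # 向前查找
--         j = (i - d + n) % n
--         if prices[j] < prices[i]:
--             return prices[j]
--     # 如果没有找到，返回0，表示不赠送
--     return 0
-- ===== SOURCE B (Python) =====
-- def find_next_cheaper(prices, i):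
--     n = len(prices)
--     if n <= 1:
--         return 0
--     pi = prices[i]
--     best_key = None
--     best_price = 0
--     for j in range(n):
--         if prices[j] < pi:
--             df = (j - i) % n
--             db = (i - j) % n
--             key = (df, 0) if df <= db else (db, 1)
--             if best_key is None or key < best_key:
--                 best_key = key
--                 best_price = prices[j]
--     return best_price
-- ===== Notes on version B (the rewrite author's own statement) =====
-- stated objective: alternative
-- what changed: Instead of probing positions outward by increasing distance (forward then backward per step, two wrap-around index computations per step) with early return, B makes one linear scan over all positions, keeping the cheaper position with the lexicographically smallest (circular distance, direction) key; B returns 0 immediately when len(prices) <= 1, matching A which never evaluates prices[i] in that case.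
import Mathlib
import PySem

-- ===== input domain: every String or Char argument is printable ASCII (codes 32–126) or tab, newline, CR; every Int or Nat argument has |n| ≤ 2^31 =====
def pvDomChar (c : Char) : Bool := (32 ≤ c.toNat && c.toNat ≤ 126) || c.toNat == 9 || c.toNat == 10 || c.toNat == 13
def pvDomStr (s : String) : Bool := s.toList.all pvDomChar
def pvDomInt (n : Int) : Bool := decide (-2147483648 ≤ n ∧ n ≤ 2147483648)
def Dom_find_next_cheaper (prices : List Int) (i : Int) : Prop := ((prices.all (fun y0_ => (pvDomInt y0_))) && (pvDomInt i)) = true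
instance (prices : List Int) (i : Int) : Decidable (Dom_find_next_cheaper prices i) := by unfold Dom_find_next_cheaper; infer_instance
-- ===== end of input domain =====

-- B replaces A's outward probing (increasing distance, forward then backward, early return)
-- by a single scan over all positions keeping the cheaper position with the lexicographically
-- smallest (circular distance, direction) key; same cost, different decomposition.

-- ===== PORT A =====
-- the 'for d in range(1, n)' loop with its two early returns, as structural recursion on the range list
def fncGoA (prices : List Int) (i : Int) (n : Int) : List Int → Int
  | [] => 0
  | d :: rest =>
    let j1 := PySem.Int.mod (i + d) n
    if PySem.List.pyGetD prices j1 0 < PySem.List.pyGetD prices i 0 then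
      PySem.List.pyGetD prices j1 0
    else
      let j2 := PySem.Int.mod (i - d + n) n
      if PySem.List.pyGetD prices j2 0 < PySem.List.pyGetD prices i 0 then
        PySem.List.pyGetD prices j2 0
      else fncGoA prices i n rest

def find_next_cheaper (prices : List Int) (i : Int) : Int :=
  let n : Int := prices.length
  fncGoA prices i n (PySem.List.pyRange 1 n 1)

-- ===== PORT B =====
-- key of position j relative to i in a circle of size n: (distance, direction)
def fncKey (i n j : Int) : Int × Int :=
  let df := PySem.Int.mod (j - i) n
  let db := PySem.Int.mod (i - j) n
  if df ≤ db then (df, 0) else (db, 1)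

-- Python tuple comparison 'key < best_key' on (Int, Int)
def fncKeyLt (a b : Int × Int) : Bool :=
  a.1 < b.1 || (a.1 == b.1 && a.2 < b.2)

-- one step of B's scan: state = Some (best_key, best_price) / None
def fncStepB (prices : List Int) (i pi n : Int) (s : Option ((Int × Int) × Int)) (j : Int) :
    Option ((Int × Int) × Int) :=
  let pj := PySem.List.pyGetD prices j 0
  if pj < pi then
    let key := fncKey i n j
    match s with
    | none => some (key, pj)
    | some (k, p) => if fncKeyLt key k then some (key, pj) else some (k, p)
  else s

def find_next_cheaper_alt (prices : List Int) (i : Int) : Int :=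
  let n : Int := prices.length
  if n ≤ 1 then 0
  else
    let pi := PySem.List.pyGetD prices i 0
    match (PySem.List.pyRange 0 n 1).foldl (fncStepB prices i pi n) none with
    | none => 0
    | some (_, p) => p

-- ===== PRECONDITION & SPEC =====
-- Pre_ excludes exactly the inputs where A raises IndexError: len(prices) ≥ 2 with i out of range
-- (A evaluates prices[i] only when its loop runs, i.e. when len(prices) ≥ 2).
def Pre_find_next_cheaper (prices : List Int) (i : Int) : Prop :=
  prices.length ≤ 1 ∨ PySem.Raise.InRange prices.length i
instance (prices : List Int) (i : Int) : Decidable (Pre_find_next_cheaper prices i) := by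
  unfold Pre_find_next_cheaper; infer_instance

def pvWitness_find_next_cheaper : List Int × Int := ([3, 1, 2], 0)

def Spec_find_next_cheaper (prices : List Int) (i : Int) (out : Int) : Prop := out = find_next_cheaper_alt prices i
instance (prices : List Int) (i : Int) (out : Int) : Decidable (Spec_find_next_cheaper prices i out) := by unfold Spec_find_next_cheaper; infer_instance

-- ===== CLAIM (what is proved, stated in full; the proofs are below) =====
def Claim_equal_find_next_cheaper : Prop := ∀ (prices : List Int) (i : Int), Dom_find_next_cheaper prices i → Pre_find_next_cheaper prices i → Spec_find_next_cheaper prices i (find_next_cheaper prices i)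

-- ===== LEMMAS AND PROOFS =====

-- abbreviations used only by the proofs
def fncCheap (prices : List Int) (i j : Int) : Prop :=
  PySem.List.pyGetD prices j 0 < PySem.List.pyGetD prices i 0

def fncDf (i n j : Int) : Int := (j - i) % n
def fncDb (i n j : Int) : Int := (i - j) % n
def fncDist (i n j : Int) : Int := min (fncDf i n j) (fncDb i n j)

-- elementary modular arithmetic (omega does not handle a variable modulus)
theorem pvMod_bounds (a n : Int) (hn : 0 < n) : 0 ≤ a % n ∧ a % n < n :=
  ⟨Int.emod_nonneg a (by omega), Int.emod_lt_of_pos a hn⟩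

theorem pvMod_dvd (a n : Int) : n ∣ (a - a % n) :=
  ⟨a / n, by rw [Int.emod_def]; ring⟩

theorem pvMod_eq_iff (a r n : Int) (hn : 0 < n) (h0 : 0 ≤ r) (h1 : r < n)
    (hd : n ∣ (a - r)) : a % n = r := by
  obtain ⟨k, hk⟩ := hd
  have ha : a = r + n * k := by linarith
  rw [ha, Int.add_mul_emod_self_left, Int.emod_eq_of_lt h0 h1]

theorem pvMod_inj (a b n : Int) (hn : 0 < n) (ha0 : 0 ≤ a) (ha1 : a < n)
    (hb0 : 0 ≤ b) (hb1 : b < n) (h : n ∣ (a - b)) : a = b := by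
  have := Int.eq_zero_of_abs_lt_dvd h (by rw [abs_lt]; omega)
  omega

theorem fncKeyLt_iff (a b : Int × Int) :
    fncKeyLt a b = true ↔ (a.1 < b.1 ∨ (a.1 = b.1 ∧ a.2 < b.2)) := by
  simp [fncKeyLt]

theorem fncKey_eq (i n j : Int) (hn : 0 < n) :
    fncKey i n j = if fncDf i n j ≤ fncDb i n j then (fncDf i n j, 0) else (fncDb i n j, 1) := by
  simp only [fncKey, fncDf, fncDb, PySem.Int.mod_eq_emod_of_pos hn]

-- df and db of the positions A probes at step d
theorem fncDf_j1 (i n d : Int) (hn : 0 < n) (hd0 : 1 ≤ d) (hd1 : d < n) :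
    fncDf i n ((i + d) % n) = d := by
  obtain ⟨k, hk⟩ := pvMod_dvd (i + d) n
  exact pvMod_eq_iff _ _ _ hn (by omega) hd1 ⟨-k, by linarith⟩

theorem fncDb_j1 (i n d : Int) (hn : 0 < n) (hd0 : 1 ≤ d) (hd1 : d < n) :
    fncDb i n ((i + d) % n) = n - d := by
  obtain ⟨k, hk⟩ := pvMod_dvd (i + d) n
  exact pvMod_eq_iff _ _ _ hn (by omega) (by omega) ⟨k - 1, by rw [mul_sub]; linarith⟩

theorem fncDf_j2 (i n d : Int) (hn : 0 < n) (hd0 : 1 ≤ d) (hd1 : d < n) :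
    fncDf i n ((i - d + n) % n) = n - d := by
  obtain ⟨k, hk⟩ := pvMod_dvd (i - d + n) n
  exact pvMod_eq_iff _ _ _ hn (by omega) (by omega) ⟨-k, by linarith⟩

theorem fncDb_j2 (i n d : Int) (hn : 0 < n) (hd0 : 1 ≤ d) (hd1 : d < n) :
    fncDb i n ((i - d + n) % n) = d := by
  obtain ⟨k, hk⟩ := pvMod_dvd (i - d + n) n
  exact pvMod_eq_iff _ _ _ hn (by omega) hd1 ⟨k - 1, by rw [mul_sub]; linarith⟩

-- a position in [0, n) is determined by its forward distance
theorem fncDf_inj_j1 (i n d j : Int) (hn : 0 < n) (hj0 : 0 ≤ j) (hj1 : j < n)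
    (h : fncDf i n j = d) : j = (i + d) % n := by
  obtain ⟨k1, hk1⟩ := pvMod_dvd (j - i) n
  obtain ⟨k2, hk2⟩ := pvMod_dvd (i + d) n
  have hb := pvMod_bounds (i + d) n hn
  have hdf : (j - i) % n = d := h
  have e : n * (k1 + k2) = n * k1 + n * k2 := by ring
  exact pvMod_inj j ((i + d) % n) n hn hj0 hj1 hb.1 hb.2 ⟨k1 + k2, by linarith⟩

theorem fncDb_inj_j2 (i n d j : Int) (hn : 0 < n) (hj0 : 0 ≤ j) (hj1 : j < n)
    (h : fncDb i n j = d) : j = (i - d + n) % n := by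
  obtain ⟨k1, hk1⟩ := pvMod_dvd (i - j) n
  obtain ⟨k2, hk2⟩ := pvMod_dvd (i - d + n) n
  have hb := pvMod_bounds (i - d + n) n hn
  have hdb : (i - j) % n = d := h
  have e : n * (k2 - k1 - 1) = n * k2 - n * k1 - n := by ring
  exact pvMod_inj j ((i - d + n) % n) n hn hj0 hj1 hb.1 hb.2 ⟨k2 - k1 - 1, by linarith⟩

-- db is the complementary distance when df ≠ 0
theorem fncDb_compl (i n j : Int) (hn : 0 < n) (h : fncDf i n j ≠ 0) :
    fncDb i n j = n - fncDf i n j := by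
  obtain ⟨k1, hk1⟩ := pvMod_dvd (j - i) n
  have hb := pvMod_bounds (j - i) n hn
  have hdf : fncDf i n j = (j - i) % n := rfl
  have e : n * (-1 - k1) = -n - n * k1 := by ring
  refine pvMod_eq_iff _ _ _ hn (by omega) (by omega) ⟨-1 - k1, by rw [hdf]; linarith⟩

-- df = 0 forces j to be the (wrapped) index i itself
theorem fncDf_zero (i n j : Int) (hn : 0 < n) (hj0 : 0 ≤ j) (hj1 : j < n)
    (h : fncDf i n j = 0) : j = i % n := by
  obtain ⟨k1, hk1⟩ := pvMod_dvd (j - i) n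
  obtain ⟨k2, hk2⟩ := pvMod_dvd i n
  have hb := pvMod_bounds i n hn
  have hdf : (j - i) % n = 0 := h
  have e : n * (k1 + k2) = n * k1 + n * k2 := by ring
  exact pvMod_inj j (i % n) n hn hj0 hj1 hb.1 hb.2 ⟨k1 + k2, by linarith⟩

-- db = 0 also forces df = 0
theorem fncDb_zero (i n j : Int) (hn : 0 < n) (h : fncDb i n j = 0) : fncDf i n j = 0 := by
  by_contra hdf
  have := fncDb_compl i n j hn hdf
  have hb := pvMod_bounds (j - i) n hn
  have hdfe : fncDf i n j = (j - i) % n := rfl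
  omega

-- value of prices[i] is the value at i mod n (negative-index wraparound)
theorem pyGetD_emod (prices : List Int) (i : Int)
    (h : PySem.Raise.InRange prices.length i) :
    PySem.List.pyGetD prices i 0 = PySem.List.pyGetD prices (i % (prices.length : Int)) 0 := by
  obtain ⟨h1, h2⟩ := h
  by_cases hi : 0 ≤ i
  · rw [Int.emod_eq_of_lt hi h2]
  · have hi2 : i < 0 := by omega
    have hm : i % (prices.length : Int) = i + prices.length := by
      refine pvMod_eq_iff _ _ _ (by omega) (by omega) (by omega) ⟨-1, by ring⟩
    have hk : i = -(((-i).toNat : Nat) : Int) := by omega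
    rw [hm, hk, PySem.List.pyGetD_neg_natCast prices (-i).toNat 0 (by omega) (by omega)]
    rw [PySem.List.pyGetD_eq_getElem prices 0 (by omega) (by omega)]
    congr 1
    omega

-- once some cheap position is recorded with a key no later key beats, the fold keeps it
theorem foldB_keep (prices : List Int) (i pi n : Int) (k : Int × Int) (p : Int) :
    ∀ L : List Int,
      (∀ j ∈ L, PySem.List.pyGetD prices j 0 < pi → fncKeyLt (fncKey i n j) k = false) →
      L.foldl (fncStepB prices i pi n) (some (k, p)) = some (k, p)
  | [], _ => rfl
  | j :: rest, h => by
    rw [List.foldl_cons]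
    have hrest : ∀ j' ∈ rest, PySem.List.pyGetD prices j' 0 < pi →
        fncKeyLt (fncKey i n j') k = false := fun j' hj' => h j' (List.mem_cons_of_mem _ hj')
    by_cases hc : PySem.List.pyGetD prices j 0 < pi
    · have hlt := h j (List.mem_cons_self) hc
      simp only [fncStepB, if_pos hc, hlt, Bool.false_eq_true, if_false]
      exact foldB_keep prices i pi n k p rest hrest
    · simp only [fncStepB, if_neg hc]
      exact foldB_keep prices i pi n k p rest hrest

theorem fncKeyLt_asymm (a b : Int × Int) (h : fncKeyLt a b = true) : fncKeyLt b a = false := by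
  rw [fncKeyLt_iff] at h
  simp only [fncKeyLt]
  rcases h with h | ⟨h1, h2⟩ <;> simp_all <;> omega

-- the strictly key-minimal cheap position wins the fold
theorem foldB_min (prices : List Int) (i pi n : Int) :
    ∀ (L : List Int) (s : Option ((Int × Int) × Int)) (j' : Int),
      j' ∈ L → PySem.List.pyGetD prices j' 0 < pi →
      (∀ j ∈ L, PySem.List.pyGetD prices j 0 < pi → j ≠ j' →
        fncKeyLt (fncKey i n j') (fncKey i n j) = true) →
      (s = none ∨ ∃ k p, s = some (k, p) ∧ fncKeyLt (fncKey i n j') k = true) →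
      L.foldl (fncStepB prices i pi n) s = some (fncKey i n j', PySem.List.pyGetD prices j' 0)
  | [], s, j', hmem, _, _, _ => absurd hmem (List.not_mem_nil)
  | j :: rest, s, j', hmem, hc', hmin, hs => by
    rw [List.foldl_cons]
    by_cases hjj : j = j'
    · subst hjj
      have hstep : fncStepB prices i pi n s j = some (fncKey i n j, PySem.List.pyGetD prices j 0) := by
        rcases hs with rfl | ⟨k, p, rfl, hlt⟩
        · simp only [fncStepB, if_pos hc']
        · simp only [fncStepB, if_pos hc', hlt, if_true]
      rw [hstep]
      refine foldB_keep prices i pi n _ _ rest ?_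
      intro j2 hj2 hc2
      by_cases hj2j : j2 = j
      · subst hj2j
        simp [fncKeyLt]
      · exact fncKeyLt_asymm _ _ (hmin j2 (List.mem_cons_of_mem _ hj2) hc2 hj2j)
    · have hmem' : j' ∈ rest := by
        rcases List.mem_cons.mp hmem with h | h
        · exact absurd h.symm hjj
        · exact h
      have hmin' : ∀ j2 ∈ rest, PySem.List.pyGetD prices j2 0 < pi → j2 ≠ j' →
          fncKeyLt (fncKey i n j') (fncKey i n j2) = true :=
        fun j2 hj2 => hmin j2 (List.mem_cons_of_mem _ hj2)
      refine foldB_min prices i pi n rest _ j' hmem' hc' hmin' ?_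
      by_cases hc : PySem.List.pyGetD prices j 0 < pi
      · have hltj := hmin j (List.mem_cons_self) hc hjj
        rcases hs with rfl | ⟨k, p, rfl, hlt⟩
        · exact Or.inr ⟨fncKey i n j, PySem.List.pyGetD prices j 0,
            by simp only [fncStepB, if_pos hc], hltj⟩
        · by_cases hlt2 : fncKeyLt (fncKey i n j) k = true
          · exact Or.inr ⟨fncKey i n j, PySem.List.pyGetD prices j 0,
              by simp only [fncStepB, if_pos hc, hlt2, if_true], hltj⟩
          · rw [Bool.not_eq_true] at hlt2
            exact Or.inr ⟨k, p,
              by simp only [fncStepB, if_pos hc, hlt2, Bool.false_eq_true, if_false], hlt⟩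
      · rcases hs with rfl | ⟨k, p, rfl, hlt⟩
        · exact Or.inl (by simp only [fncStepB, if_neg hc])
        · exact Or.inr ⟨k, p, by simp only [fncStepB, if_neg hc], hlt⟩

-- if no position is cheap the fold stays at none
theorem foldB_none (prices : List Int) (i pi n : Int) :
    ∀ L : List Int, (∀ j ∈ L, ¬ PySem.List.pyGetD prices j 0 < pi) →
      L.foldl (fncStepB prices i pi n) none = none
  | [], _ => rfl
  | j :: rest, h => by
    rw [List.foldl_cons]
    have : fncStepB prices i pi n none j = none := by
      simp only [fncStepB, if_neg (h j (List.mem_cons_self))]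
    rw [this]
    exact foldB_none prices i pi n rest fun j' hj' => h j' (List.mem_cons_of_mem _ hj')

-- characterization of B, empty case
theorem altB_zero (prices : List Int) (i : Int) (hn : 2 ≤ (prices.length : Int))
    (h : ∀ j, 0 ≤ j → j < (prices.length : Int) → ¬ fncCheap prices i j) :
    find_next_cheaper_alt prices i = 0 := by
  simp only [find_next_cheaper_alt]
  rw [if_neg (by omega)]
  rw [foldB_none prices i _ _ _ (fun j hj => by
    have := (PySem.List.mem_pyRange_one).mp hj
    exact h j this.1 this.2)]

-- characterization of B, minimal cheap position case
theorem altB_min (prices : List Int) (i j' : Int) (hn : 2 ≤ (prices.length : Int))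
    (hj0 : 0 ≤ j') (hj1 : j' < (prices.length : Int)) (hc : fncCheap prices i j')
    (h : ∀ j, 0 ≤ j → j < (prices.length : Int) → fncCheap prices i j → j ≠ j' →
      fncKeyLt (fncKey i (prices.length : Int) j') (fncKey i (prices.length : Int) j) = true) :
    find_next_cheaper_alt prices i = PySem.List.pyGetD prices j' 0 := by
  simp only [find_next_cheaper_alt]
  rw [if_neg (by omega)]
  rw [foldB_min prices i _ _ _ none j'
    ((PySem.List.mem_pyRange_one).mpr ⟨hj0, hj1⟩) hc
    (fun j hj hcj hjj => by
      have := (PySem.List.mem_pyRange_one).mp hj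
      exact h j this.1 this.2 hcj hjj)
    (Or.inl rfl)]

-- main loop invariant: if every cheap position is at circular distance ≥ d,
-- A's remaining loop from d computes B's answer
theorem mainA (prices : List Int) (i : Int) (hn : 2 ≤ (prices.length : Int))
    (hi : PySem.Raise.InRange prices.length i) :
    ∀ (m : Nat) (d : Int), d = (prices.length : Int) - (m : Int) → 1 ≤ d →
      (∀ j, 0 ≤ j → j < (prices.length : Int) → fncCheap prices i j →
        d ≤ fncDist i (prices.length : Int) j) →
      fncGoA prices i (prices.length : Int) (PySem.List.pyRange d (prices.length : Int) 1)
        = find_next_cheaper_alt prices i := by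
  have hnpos : (0 : Int) < (prices.length : Int) := by omega
  intro m
  induction m with
  | zero =>
    intro d hd hd1 hinv
    rw [PySem.List.pyRange_one_eq_nil (by omega)]
    show (0 : Int) = _
    refine (altB_zero prices i hn ?_).symm
    intro j hj0 hj1 hcheap
    have hdist := hinv j hj0 hj1 hcheap
    have hb1 := pvMod_bounds (j - i) (prices.length : Int) hnpos
    have hdfe : fncDf i (prices.length : Int) j = (j - i) % (prices.length : Int) := rfl
    have hmin : fncDist i (prices.length : Int) j ≤ fncDf i (prices.length : Int) j :=
      min_le_left _ _
    omega
  | succ m ih =>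
    intro d hd hd1 hinv
    have hdn : d < (prices.length : Int) := by omega
    rw [PySem.List.pyRange_one_cons hdn]
    simp only [fncGoA, PySem.Int.mod_eq_emod_of_pos hnpos]
    have hbj1 := pvMod_bounds (i + d) (prices.length : Int) hnpos
    have hbj2 := pvMod_bounds (i - d + (prices.length : Int)) (prices.length : Int) hnpos
    have hdf1 := fncDf_j1 i (prices.length : Int) d hnpos hd1 hdn
    have hdb1 := fncDb_j1 i (prices.length : Int) d hnpos hd1 hdn
    have hdf2 := fncDf_j2 i (prices.length : Int) d hnpos hd1 hdn
    have hdb2 := fncDb_j2 i (prices.length : Int) d hnpos hd1 hdn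
    by_cases hc1 : PySem.List.pyGetD prices ((i + d) % (prices.length : Int)) 0
        < PySem.List.pyGetD prices i 0
    · rw [if_pos hc1]
      -- the forward probe at distance d is cheap: it is the key-minimal cheap position
      have hled : d ≤ (prices.length : Int) - d := by
        have := hinv _ hbj1.1 hbj1.2 hc1
        have h1 : fncDist i (prices.length : Int) ((i + d) % (prices.length : Int))
            ≤ fncDb i (prices.length : Int) ((i + d) % (prices.length : Int)) := min_le_right _ _
        omega
      have hkey1 : fncKey i (prices.length : Int) ((i + d) % (prices.length : Int)) = (d, 0) := by
        rw [fncKey_eq _ _ _ hnpos, hdf1, hdb1, if_pos (by omega)]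
      refine (altB_min prices i _ hn hbj1.1 hbj1.2 hc1 ?_).symm
      intro j hj0 hj1 hcj hne
      have hdist := hinv j hj0 hj1 hcj
      have hmindf : fncDist i (prices.length : Int) j ≤ fncDf i (prices.length : Int) j :=
        min_le_left _ _
      have hmindb : fncDist i (prices.length : Int) j ≤ fncDb i (prices.length : Int) j :=
        min_le_right _ _
      have hdfne : fncDf i (prices.length : Int) j ≠ d := by
        intro heq
        exact hne (fncDf_inj_j1 i (prices.length : Int) d j hnpos hj0 hj1 heq)
      rw [hkey1, fncKeyLt_iff, fncKey_eq _ _ _ hnpos]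
      split_ifs with hfb
      · left; simp only; omega
      · by_cases hdbd : fncDb i (prices.length : Int) j = d
        · right; exact ⟨by simpa using hdbd.symm, by norm_num⟩
        · left; simp only; omega
    · rw [if_neg hc1]
      by_cases hc2 : PySem.List.pyGetD prices ((i - d + (prices.length : Int)) % (prices.length : Int)) 0
          < PySem.List.pyGetD prices i 0
      · rw [if_pos hc2]
        -- the backward probe at distance d is cheap: it is the key-minimal cheap position
        have hled : d ≤ (prices.length : Int) - d := by
          have := hinv _ hbj2.1 hbj2.2 hc2
          have h1 : fncDist i (prices.length : Int) ((i - d + (prices.length : Int)) % (prices.length : Int))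
              ≤ fncDf i (prices.length : Int) ((i - d + (prices.length : Int)) % (prices.length : Int)) :=
            min_le_left _ _
          omega
        have hnd : (prices.length : Int) - d ≠ d := by
          intro heq
          have : (i - d + (prices.length : Int)) % (prices.length : Int) = (i + d) % (prices.length : Int) :=
            fncDf_inj_j1 i (prices.length : Int) d _ hnpos hbj2.1 hbj2.2 (by omega)
          rw [this] at hc2
          exact hc1 hc2
        have hkey2 : fncKey i (prices.length : Int) ((i - d + (prices.length : Int)) % (prices.length : Int))
            = (d, 1) := by
          rw [fncKey_eq _ _ _ hnpos, hdf2, hdb2, if_neg (by omega)]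
        refine (altB_min prices i _ hn hbj2.1 hbj2.2 hc2 ?_).symm
        intro j hj0 hj1 hcj hne
        have hdist := hinv j hj0 hj1 hcj
        have hmindf : fncDist i (prices.length : Int) j ≤ fncDf i (prices.length : Int) j :=
          min_le_left _ _
        have hmindb : fncDist i (prices.length : Int) j ≤ fncDb i (prices.length : Int) j :=
          min_le_right _ _
        have hdfne : fncDf i (prices.length : Int) j ≠ d := by
          intro heq
          have hj := fncDf_inj_j1 i (prices.length : Int) d j hnpos hj0 hj1 heq
          rw [hj] at hcj
          exact hc1 hcj
        have hdbne : fncDb i (prices.length : Int) j ≠ d := by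
          intro heq
          exact hne (fncDb_inj_j2 i (prices.length : Int) d j hnpos hj0 hj1 heq)
        rw [hkey2, fncKeyLt_iff, fncKey_eq _ _ _ hnpos]
        split_ifs with hfb
        · left; simp only; omega
        · left; simp only; omega
      · rw [if_neg hc2]
        -- neither probe is cheap: every cheap position is at distance ≥ d + 1
        refine ih (d + 1) (by omega) (by omega) ?_
        intro j hj0 hj1 hcj
        have hdist := hinv j hj0 hj1 hcj
        have hdfne : fncDf i (prices.length : Int) j ≠ d := by
          intro heq
          have hj := fncDf_inj_j1 i (prices.length : Int) d j hnpos hj0 hj1 heq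
          rw [hj] at hcj
          exact hc1 hcj
        have hdbne : fncDb i (prices.length : Int) j ≠ d := by
          intro heq
          have hj := fncDb_inj_j2 i (prices.length : Int) d j hnpos hj0 hj1 heq
          rw [hj] at hcj
          exact hc2 hcj
        have hmindf : fncDist i (prices.length : Int) j ≤ fncDf i (prices.length : Int) j :=
          min_le_left _ _
        have hmindb : fncDist i (prices.length : Int) j ≤ fncDb i (prices.length : Int) j :=
          min_le_right _ _
        have hdd : fncDist i (prices.length : Int) j = fncDf i (prices.length : Int) j
            ∨ fncDist i (prices.length : Int) j = fncDb i (prices.length : Int) j :=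
          min_choice _ _
        omega

-- ===== VERDICT (by name: the statement is the Claim_ definition above) =====
theorem find_next_cheaper_spec : Claim_equal_find_next_cheaper := by
  intro prices i _ hpre
  unfold Spec_find_next_cheaper
  by_cases hlen : (prices.length : Int) ≤ 1
  · have hA : find_next_cheaper prices i
        = fncGoA prices i (prices.length : Int)
            (PySem.List.pyRange 1 (prices.length : Int) 1) := rfl
    rw [hA, PySem.List.pyRange_one_eq_nil (by omega)]
    show (0 : Int) = _
    have hB : find_next_cheaper_alt prices i = 0 := by
      simp only [find_next_cheaper_alt]
      rw [if_pos hlen]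
    exact hB.symm
  · have hn2 : 2 ≤ (prices.length : Int) := by omega
    have hi : PySem.Raise.InRange prices.length i := by
      rcases hpre with h | h
      · exfalso; omega
      · exact h
    have hA : find_next_cheaper prices i
        = fncGoA prices i (prices.length : Int)
            (PySem.List.pyRange 1 (prices.length : Int) 1) := rfl
    rw [hA]
    refine mainA prices i hn2 hi (prices.length - 1) 1 (by omega) (by omega) ?_
    intro j hj0 hj1 hcj
    have hmindf : fncDist i (prices.length : Int) j ≤ fncDf i (prices.length : Int) j :=
      min_le_left _ _
    have hmindb : fncDist i (prices.length : Int) j ≤ fncDb i (prices.length : Int) j :=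
      min_le_right _ _
    have hb1 := pvMod_bounds (j - i) (prices.length : Int) (by omega)
    have hb2 := pvMod_bounds (i - j) (prices.length : Int) (by omega)
    have hdfe : fncDf i (prices.length : Int) j = (j - i) % (prices.length : Int) := rfl
    have hdbe : fncDb i (prices.length : Int) j = (i - j) % (prices.length : Int) := rfl
    have hdfnz : fncDf i (prices.length : Int) j ≠ 0 := by
      intro h0
      have hj := fncDf_zero i (prices.length : Int) j (by omega) hj0 hj1 h0
      rw [hj] at hcj
      simp only [fncCheap] at hcj
      rw [pyGetD_emod prices i hi] at hcj
      exact lt_irrefl _ hcj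
    have hdbnz : fncDb i (prices.length : Int) j ≠ 0 := by
      intro h0
      exact hdfnz (fncDb_zero i (prices.length : Int) j (by omega) h0)
    have hdd : fncDist i (prices.length : Int) j = fncDf i (prices.length : Int) j
        ∨ fncDist i (prices.length : Int) j = fncDb i (prices.length : Int) j :=
      min_choice _ _
    omega
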